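-- pv_equiv track=rewrite | github.com/kseungwoo/algorithm-problem-solving | programmers/level2/기능개발.py | solution
-- ===== SOURCE A (Python) =====
-- def solution(progresses, speeds):
--     answer = []
--     while len(progresses)!=0:
--         for i in range(len(progresses)):
--             progresses[i]+=speeds[i]
--         if progresses[0]>=100:
--             popped=0
--             while len(progresses)!=0 and progresses[0]>=100:
--                 del progresses[0]
--                 del speeds[0]
--                 popped+=1
--             answer.append(popped)
--     return answer
-- ===== SOURCE B (Python) =====
-- def solution(progresses, speeds):
--     # O(n): completion day per task via ceiling division, then group by running max.
--     days = [max(1, -((p - 100) // s)) for p, s in zip(progresses, speeds)]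
--     answer = []
--     cur = None
--     count = 0
--     for d in days:
--         if cur is None or d > cur:
--             if count:
--                 answer.append(count)
--             cur, count = d, 1
--         else:
--             count += 1
--     if count:
--         answer.append(count)
--     return answer
-- ===== Notes on version B (the rewrite author's own statement) =====
-- stated objective: faster
-- what changed: Replaces the day-by-day mutation simulation (increment every task each round, pop finished prefixes) with a closed-form ceiling-division completion day per task followed by one linear grouping pass; intended as asymptotically faster (O(n) vs O(n*maxDays)); measured: A timed out at n=16 where B returned, so no clean ratio was obtained.
-- outside the precondition, e.g. on solution([100], [0]): A returns [1], B raises ZeroDivisionError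
import Mathlib
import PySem

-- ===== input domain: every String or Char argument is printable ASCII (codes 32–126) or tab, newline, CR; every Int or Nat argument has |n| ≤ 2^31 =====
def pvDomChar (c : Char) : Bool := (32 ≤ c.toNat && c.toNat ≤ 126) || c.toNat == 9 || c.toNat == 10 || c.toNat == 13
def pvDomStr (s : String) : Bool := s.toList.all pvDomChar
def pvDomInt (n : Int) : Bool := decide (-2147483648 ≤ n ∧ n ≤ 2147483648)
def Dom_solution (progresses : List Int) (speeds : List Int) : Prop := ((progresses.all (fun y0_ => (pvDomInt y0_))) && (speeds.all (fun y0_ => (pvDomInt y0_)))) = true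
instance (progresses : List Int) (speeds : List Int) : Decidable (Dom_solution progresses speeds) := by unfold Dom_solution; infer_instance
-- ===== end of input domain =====

-- B replaces A's day-by-day simulation with a closed-form completion day per task plus one
-- grouping pass; intended as faster (a timing run saw A time out at n=16 where B returned,
-- but could not measure a clean ratio). A mutates its argument lists in place (it empties them);
-- B does not — the equivalence proved here is about the return value only.

-- ===== PORT A =====
-- the for-loop 'progresses[i] += speeds[i]': exact when len(speeds) ≥ len(progresses) (Pre_)
-- inner while loop 'del progresses[0]; del speeds[0]; popped += 1'
def solA_pop : List Int → List Int → Int → List Int × List Int × Int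
  | p :: ps, s :: ss, k => if p ≥ 100 then solA_pop ps ss (k + 1) else (p :: ps, s :: ss, k)
  | ps, ss, k => (ps, ss, k)

def solA_loop : Nat → List Int → List Int → List Int → List Int
  | 0, _, _, ans => ans
  | fuel + 1, ps, ss, ans =>
    if ps.isEmpty then ans
    else
      let ps' := ps.zipWith (· + ·) ss
      match ps' with
      | [] => ans  -- unreachable under Pre_ (speeds at least as long as progresses)
      | p :: _ =>
        if p ≥ 100 then
          let r := solA_pop ps' ss 0
          solA_loop fuel r.1 r.2.1 (ans ++ [r.2.2])
        else solA_loop fuel ps' ss ans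

def solution (progresses : List Int) (speeds : List Int) : List Int :=
  -- fuel: under Pre_ (all used speeds ≥ 1) the while loop runs at most 100 + Σ|p| rounds
  solA_loop (100 + progresses.foldl (fun a p => a + p.natAbs) 0) progresses speeds []

-- ===== PORT B =====
def solB_days (progresses : List Int) (speeds : List Int) : List Int :=
  (progresses.zip speeds).map (fun x => max 1 (-(PySem.Int.floordiv (x.1 - 100) x.2)))

def solB_loop : List Int → Option Int → Int → List Int → List Int
  | [], _, count, ans => if count ≠ 0 then ans ++ [count] else ans
  | d :: ds, none, count, ans => solB_loop ds (some d) 1 (if count ≠ 0 then ans ++ [count] else ans)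
  | d :: ds, some c, count, ans =>
    if d > c then solB_loop ds (some d) 1 (if count ≠ 0 then ans ++ [count] else ans)
    else solB_loop ds (some c) (count + 1) ans

def solution_alt (progresses : List Int) (speeds : List Int) : List Int :=
  solB_loop (solB_days progresses speeds) none 0 []

-- ===== PRECONDITION & SPEC =====
-- Pre_ excludes speeds lists shorter than progresses (A raises IndexError) and non-positive
-- paired speeds: there A loops forever whenever an unfinished task has such a speed, and on the
-- corner inputs where it does return (progress already at least 100 - speed) B's division-based
-- day formula divides by zero.
def Pre_solution (progresses : List Int) (speeds : List Int) : Prop :=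
  progresses.length ≤ speeds.length ∧ ∀ x ∈ progresses.zip speeds, 1 ≤ x.2
instance (progresses : List Int) (speeds : List Int) : Decidable (Pre_solution progresses speeds) := by
  unfold Pre_solution; infer_instance

def pvWitness_solution : List Int × List Int := ([93, 30, 55], [1, 30, 5])

def Spec_solution (progresses : List Int) (speeds : List Int) (out : List Int) : Prop := out = solution_alt progresses speeds
instance (progresses : List Int) (speeds : List Int) (out : List Int) : Decidable (Spec_solution progresses speeds out) := by unfold Spec_solution; infer_instance

-- ===== CLAIM (what is proved, stated in full; the proofs are below) =====
def Claim_equal_solution : Prop := ∀ (progresses : List Int) (speeds : List Int), Dom_solution progresses speeds → Pre_solution progresses speeds → Spec_solution progresses speeds (solution progresses speeds)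

-- ===== LEMMAS AND PROOFS =====

-- completion day of a task: smallest t ≥ 1 with p + t*s ≥ 100 (for s ≥ 1)
def dday (p s : Int) : Int := max 1 (-(PySem.Int.floordiv (p - 100) s))

def daysL (L : List (Int × Int)) : List Int := L.map (fun x => dday x.1 x.2)

-- the grouping of completion days by running maximum
def groups : List Int → List Int
  | [] => []
  | d :: ds =>
    (1 + ((ds.takeWhile (· ≤ d)).length : Int)) :: groups (ds.dropWhile (· ≤ d))
termination_by l => l.length
decreasing_by
  exact Nat.lt_succ_of_le (List.length_dropWhile_le _ _)

lemma groups_nil : groups [] = [] := by rw [groups]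

lemma groups_cons (d : Int) (ds : List Int) :
    groups (d :: ds) = (1 + ((ds.takeWhile (· ≤ d)).length : Int)) :: groups (ds.dropWhile (· ≤ d)) := by
  rw [groups]

def maxday : List (Int × Int) → Int
  | [] => 0
  | x :: xs => max (dday x.1 x.2) (maxday xs)

lemma dday_le (p s t : Int) (hs : 1 ≤ s) (ht : 1 ≤ t) :
    dday p s ≤ t ↔ 100 ≤ p + t * s := by
  unfold dday
  rw [max_le_iff]
  have h := PySem.Int.le_floordiv_iff_mul_le (a := p - 100) (b := s) (q := -t) (by omega)
  rw [neg_mul] at h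
  constructor
  · rintro ⟨-, h2⟩
    have h3 : -t ≤ PySem.Int.floordiv (p - 100) s := by omega
    have := h.mp h3
    linarith
  · intro h100
    have h3 : -(t * s) ≤ p - 100 := by linarith
    have := h.mpr h3
    exact ⟨ht, by omega⟩

lemma dday_pos (p s : Int) : 1 ≤ dday p s := le_max_left _ _

lemma dday_bound (p s : Int) (hs : 1 ≤ s) : dday p s ≤ 100 + (p.natAbs : Int) := by
  rw [dday_le p s _ hs (by omega)]
  have h1 : (100 + (p.natAbs : Int)) * 1 ≤ (100 + (p.natAbs : Int)) * s :=
    mul_le_mul_of_nonneg_left hs (by positivity)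
  have h2 : -(p.natAbs : Int) ≤ p := by omega
  linarith

lemma maxday_dropWhile_le (q : Int × Int → Bool) :
    ∀ xs : List (Int × Int), maxday (xs.dropWhile q) ≤ maxday xs := by
  intro xs
  induction xs with
  | nil => simp [maxday]
  | cons x xs ih =>
    by_cases hq : q x
    · rw [List.dropWhile_cons_of_pos hq]
      exact le_trans ih (le_max_right _ _)
    · rw [List.dropWhile_cons_of_neg (by simp [hq])]

lemma dropWhile_head_false (q : Int × Int → Bool) :
    ∀ (l : List (Int × Int)) y ys, l.dropWhile q = y :: ys → q y = false := by
  intro l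
  induction l with
  | nil => intro y ys h; simp [List.dropWhile] at h
  | cons x xs ih =>
    intro y ys h
    by_cases hq : q x
    · rw [List.dropWhile_cons_of_pos hq] at h; exact ih y ys h
    · rw [List.dropWhile_cons_of_neg (by simp [hq])] at h
      cases h; simpa using hq

lemma takeWhile_congr' {α : Type} (p q : α → Bool) :
    ∀ l : List α, (∀ x ∈ l, p x = q x) → l.takeWhile p = l.takeWhile q := by
  intro l
  induction l with
  | nil => intro _; rfl
  | cons x xs ih =>
    intro h
    have hx := h x (by simp)
    simp only [List.takeWhile_cons, hx]
    cases q x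
    · rfl
    · simp [ih (fun y hy => h y (by simp [hy]))]

lemma dropWhile_congr' {α : Type} (p q : α → Bool) :
    ∀ l : List α, (∀ x ∈ l, p x = q x) → l.dropWhile p = l.dropWhile q := by
  intro l
  induction l with
  | nil => intro _; rfl
  | cons x xs ih =>
    intro h
    have hx := h x (by simp)
    simp only [List.dropWhile_cons, hx]
    cases q x
    · rfl
    · simp [ih (fun y hy => h y (by simp [hy]))]

lemma zipWith_add_map (t : Int) :
    ∀ (L : List (Int × Int)) (ext : List Int),
      List.zipWith (· + ·) (L.map (fun x => x.1 + t * x.2)) (L.map Prod.snd ++ ext)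
        = L.map (fun x => x.1 + (t + 1) * x.2) := by
  intro L
  induction L with
  | nil => intro ext; simp
  | cons x xs ih =>
    intro ext
    simp only [List.map_cons, List.cons_append, List.zipWith_cons_cons, ih]
    congr 1
    ring

lemma pop_eq (f : Int × Int → Int) :
    ∀ (L : List (Int × Int)) (ext : List Int) (k : Int),
      solA_pop (L.map f) (L.map Prod.snd ++ ext) k =
        ((L.dropWhile (fun x => 100 ≤ f x)).map f,
         (L.dropWhile (fun x => 100 ≤ f x)).map Prod.snd ++ ext,
         k + ((L.takeWhile (fun x => 100 ≤ f x)).length : Int)) := by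
  intro L
  induction L with
  | nil =>
    intro ext k
    simp [solA_pop]
  | cons x xs ih =>
    intro ext k
    by_cases hx : 100 ≤ f x
    · rw [List.dropWhile_cons_of_pos (by simpa using hx),
        List.takeWhile_cons_of_pos (by simpa using hx)]
      simp only [List.map_cons, List.cons_append, solA_pop, ge_iff_le, hx, if_true, ih,
        List.length_cons]
      congr 2
      push_cast
      ring
    · rw [List.dropWhile_cons_of_neg (by simpa using hx),
        List.takeWhile_cons_of_neg (by simpa using hx)]
      simp only [List.map_cons, List.cons_append, solA_pop, ge_iff_le, hx, if_false,
        List.length_nil]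
      simp

lemma loopA_eq :
    ∀ (fuel : Nat) (L : List (Int × Int)) (ext : List Int) (t : Int) (ans : List Int),
      (∀ x ∈ L, 1 ≤ x.2) → 0 ≤ t →
      (∀ x xs', L = x :: xs' → t < dday x.1 x.2) →
      maxday L ≤ t + fuel →
      solA_loop fuel (L.map (fun x => x.1 + t * x.2)) (L.map Prod.snd ++ ext) ans
        = ans ++ groups (daysL L) := by
  intro fuel
  induction fuel with
  | zero =>
    intro L ext t ans hs ht hhead hmax
    cases L with
    | nil => simp [solA_loop, daysL, groups_nil]
    | cons x xs =>
      exfalso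
      have h1 := hhead x xs rfl
      have h2 : dday x.1 x.2 ≤ maxday (x :: xs) := by simp [maxday]
      omega
  | succ fuel ih =>
    intro L ext t ans hs ht hhead hmax
    cases L with
    | nil => simp [solA_loop, daysL, groups_nil]
    | cons x xs =>
      have hsx : 1 ≤ x.2 := hs x (by simp)
      have hthead := hhead x xs rfl
      have hz := zipWith_add_map t (x :: xs) ext
      have hz' : List.zipWith (· + ·) ((x :: xs).map (fun y => y.1 + t * y.2))
          ((x :: xs).map Prod.snd ++ ext)
          = (x.1 + (t + 1) * x.2) :: xs.map (fun y => y.1 + (t + 1) * y.2) := hz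
      have hstep : solA_loop (fuel + 1) ((x :: xs).map (fun y => y.1 + t * y.2))
            ((x :: xs).map Prod.snd ++ ext) ans
          = (if x.1 + (t + 1) * x.2 ≥ 100 then
               let r := solA_pop ((x.1 + (t + 1) * x.2) :: xs.map (fun y => y.1 + (t + 1) * y.2))
                 (x.2 :: (xs.map Prod.snd ++ ext)) 0
               solA_loop fuel r.1 r.2.1 (ans ++ [r.2.2])
             else solA_loop fuel
               ((x.1 + (t + 1) * x.2) :: xs.map (fun y => y.1 + (t + 1) * y.2))
               (x.2 :: (xs.map Prod.snd ++ ext)) ans) := by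
        rw [solA_loop, hz']
        rfl
      rw [hstep]
      by_cases hpop : 100 ≤ x.1 + (t + 1) * x.2
      · rw [if_pos (by exact hpop)]
        have hdx : dday x.1 x.2 = t + 1 := by
          have h1 := (dday_le x.1 x.2 (t + 1) hsx (by omega)).mpr hpop
          omega
        rw [show (x.2 :: (xs.map Prod.snd ++ ext)) = (x :: xs).map Prod.snd ++ ext from rfl,
            show (x.1 + (t + 1) * x.2) :: xs.map (fun y => y.1 + (t + 1) * y.2)
              = (x :: xs).map (fun y => y.1 + (t + 1) * y.2) from rfl,
            pop_eq (fun y => y.1 + (t + 1) * y.2) (x :: xs) ext 0]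
        rw [List.dropWhile_cons_of_pos
              (p := fun y : Int × Int => decide (100 ≤ y.1 + (t + 1) * y.2)) (a := x)
              (by simpa using hpop),
            List.takeWhile_cons_of_pos
              (p := fun y : Int × Int => decide (100 ≤ y.1 + (t + 1) * y.2)) (a := x)
              (by simpa using hpop)]
        rw [ih (xs.dropWhile (fun y => decide (100 ≤ y.1 + (t + 1) * y.2))) ext (t + 1) _
              (fun y hy => hs y (List.mem_cons_of_mem x
                ((List.dropWhile_sublist _).subset hy)))
              (by omega)
              (fun y ys' heq => by
                have hf := dropWhile_head_false _ xs y ys' heq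
                have hy : y ∈ xs := (List.dropWhile_sublist _).subset (heq ▸ List.mem_cons_self)
                have hsy : 1 ≤ y.2 := hs y (List.mem_cons_of_mem x hy)
                have := (dday_le y.1 y.2 (t + 1) hsy (by omega))
                simp only [decide_eq_false_iff_not] at hf
                omega)
              (by
                have h1 := maxday_dropWhile_le
                  (fun y : Int × Int => decide (100 ≤ y.1 + (t + 1) * y.2)) xs
                have h2 : maxday xs ≤ maxday (x :: xs) := by simp [maxday]
                omega)]
        have hpred : ∀ y ∈ xs, (fun z : Int × Int => decide (100 ≤ z.1 + (t + 1) * z.2)) y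
            = (fun z : Int × Int => decide (dday z.1 z.2 ≤ dday x.1 x.2)) y := by
          intro y hy
          have hsy : 1 ≤ y.2 := hs y (List.mem_cons_of_mem x hy)
          have := dday_le y.1 y.2 (t + 1) hsy (by omega)
          simp only [decide_eq_decide]
          rw [hdx]
          omega
        rw [takeWhile_congr' _ _ xs hpred, dropWhile_congr' _ _ xs hpred]
        rw [show daysL (x :: xs) = dday x.1 x.2 :: daysL xs from rfl, groups_cons]
        rw [show (daysL xs).takeWhile (· ≤ dday x.1 x.2)
              = (xs.takeWhile (fun z => decide (dday z.1 z.2 ≤ dday x.1 x.2))).map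
                  (fun y => dday y.1 y.2) from by
            rw [show daysL xs = xs.map (fun y => dday y.1 y.2) from rfl, List.takeWhile_map]
            rfl]
        rw [show (daysL xs).dropWhile (· ≤ dday x.1 x.2)
              = daysL (xs.dropWhile (fun z => decide (dday z.1 z.2 ≤ dday x.1 x.2))) from by
            rw [show daysL xs = xs.map (fun y => dday y.1 y.2) from rfl, List.dropWhile_map]
            rfl]
        simp only [List.length_cons, List.length_map, List.append_assoc, List.singleton_append]
        congr 2
        push_cast
        ring
      · rw [if_neg (by exact hpop)]
        rw [show (x.1 + (t + 1) * x.2) :: xs.map (fun y => y.1 + (t + 1) * y.2)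
              = (x :: xs).map (fun y => y.1 + (t + 1) * y.2) from rfl]
        exact ih (x :: xs) ext (t + 1) ans hs (by omega)
          (fun y ys' heq => by
            have h1 := dday_le x.1 x.2 (t + 1) hsx (by omega)
            have h2 : t + 1 < dday x.1 x.2 := by omega
            exact (List.cons.inj heq).1 ▸ h2)
          (by omega)

lemma bLoop_some :
    ∀ (ds : List Int) (c k : Int) (ans : List Int), 1 ≤ k →
      solB_loop ds (some c) k ans
        = ans ++ (k + ((ds.takeWhile (· ≤ c)).length : Int)) :: groups (ds.dropWhile (· ≤ c)) := by
  intro ds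
  induction ds with
  | nil =>
    intro c k ans hk
    simp only [solB_loop, List.takeWhile_nil, List.dropWhile_nil, groups_nil, List.length_nil,
      Nat.cast_zero, add_zero, if_pos (show k ≠ 0 by omega)]
  | cons d ds ih =>
    intro c k ans hk
    by_cases hdc : d > c
    · have h1 : ¬ d ≤ c := by omega
      simp only [solB_loop, if_pos hdc, if_pos (show k ≠ 0 by omega)]
      rw [ih d 1 _ (le_refl 1),
        List.takeWhile_cons_of_neg (by simpa using h1),
        List.dropWhile_cons_of_neg (by simpa using h1), groups_cons]
      simp
    · have h1 : d ≤ c := by omega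
      simp only [solB_loop, if_neg hdc]
      rw [ih c (k + 1) ans (by omega),
        List.takeWhile_cons_of_pos (by simpa using h1),
        List.dropWhile_cons_of_pos (by simpa using h1)]
      congr 2
      simp only [List.length_cons]
      push_cast
      omega

lemma bLoop_groups (ds : List Int) : solB_loop ds none 0 [] = groups ds := by
  cases ds with
  | nil => simp [solB_loop, groups_nil]
  | cons d ds =>
    simp only [solB_loop, if_neg (by omega : ¬ (0 : Int) ≠ 0)]
    rw [bLoop_some ds d 1 [] (le_refl 1), groups_cons]
    simp

lemma map_snd_zip_take :
    ∀ (l1 : List Int) (l2 : List Int), l1.length ≤ l2.length →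
      (l1.zip l2).map Prod.snd ++ l2.drop l1.length = l2 := by
  intro l1
  induction l1 with
  | nil => intro l2 _; simp
  | cons a l1 ih =>
    intro l2 h
    cases l2 with
    | nil => simp at h
    | cons b l2 => simpa using ih l2 (by simpa using h)

lemma foldl_natAbs : ∀ (l : List Int) (a : Nat),
    l.foldl (fun a p => a + p.natAbs) a = a + l.foldl (fun a p => a + p.natAbs) 0 := by
  intro l
  induction l with
  | nil => intro a; simp
  | cons x xs ih =>
    intro a
    simp only [List.foldl_cons, Nat.zero_add]
    rw [ih (a + x.natAbs), ih x.natAbs]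
    omega

lemma maxday_bound :
    ∀ (ps ss : List Int), (∀ x ∈ ps.zip ss, 1 ≤ x.2) →
      maxday (ps.zip ss) ≤ 100 + ((ps.foldl (fun a p => a + p.natAbs) 0 : Nat) : Int) := by
  intro ps
  induction ps with
  | nil => intro ss _; simp [maxday]
  | cons p ps ih =>
    intro ss h
    cases ss with
    | nil => simp [maxday]; positivity
    | cons s ss =>
      simp only [List.zip_cons_cons, maxday, max_le_iff]
      have h1 : 1 ≤ s := h (p, s) (by simp)
      have h2 := ih ss (fun x hx => h x (by simp [hx]))
      have h3 := dday_bound p s h1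
      simp only [List.foldl_cons, Nat.zero_add]
      rw [foldl_natAbs ps p.natAbs, Nat.cast_add]
      constructor <;> omega

-- ===== VERDICT (by name: the statement is the Claim_ definition above) =====
theorem solution_spec : Claim_equal_solution := by
  intro ps ss _ hpre
  obtain ⟨hlen, hsp⟩ := hpre
  unfold Spec_solution solution solution_alt solB_days
  rw [show (ps.zip ss).map (fun x => max 1 (-(PySem.Int.floordiv (x.1 - 100) x.2)))
        = daysL (ps.zip ss) from rfl, bLoop_groups]
  have hps : ps = (ps.zip ss).map (fun x => x.1 + 0 * x.2) := by
    have h := List.map_fst_zip (l₁ := ps) (l₂ := ss) hlen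
    calc ps = (ps.zip ss).map Prod.fst := h.symm
      _ = (ps.zip ss).map (fun x => x.1 + 0 * x.2) := by
        apply List.map_congr_left
        intro x _
        ring
  have hss : ss = (ps.zip ss).map Prod.snd ++ ss.drop ps.length :=
    (map_snd_zip_take ps ss hlen).symm
  calc solA_loop (100 + ps.foldl (fun a p => a + p.natAbs) 0) ps ss []
      = solA_loop (100 + ps.foldl (fun a p => a + p.natAbs) 0)
          ((ps.zip ss).map (fun x => x.1 + 0 * x.2))
          ((ps.zip ss).map Prod.snd ++ ss.drop ps.length) [] := by rw [← hps, ← hss]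
    _ = [] ++ groups (daysL (ps.zip ss)) := by
        apply loopA_eq _ _ _ _ _ hsp le_rfl
        · intro x xs' _
          exact lt_of_lt_of_le zero_lt_one (dday_pos x.1 x.2)
        · have := maxday_bound ps ss hsp
          push_cast
          push_cast at this
          omega
    _ = groups (daysL (ps.zip ss)) := by simp
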